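-- pv_equiv track=rewrite | github.com/krisciu/-ATH | engine/typography.py | create_spiral_text
-- ===== SOURCE A (Python) =====
-- def create_spiral_text(text: str, clockwise: bool = True) -> str:
--     """Create spiraling text effect."""
--     words = text.split()
--     if len(words) < 3:
--         return text
--
--     spiral = []
--     indent = 0
--     direction = 1 if clockwise else -1
--
--     for i, word in enumerate(words[:10]):  # Limit to 10 words
--         spiral.append(" " * abs(indent) + word)
--         indent += direction
--         if abs(indent) > 5:
--             direction *= -1
--
--     return "\n".join(spiral)
-- ===== SOURCE B (Python) =====
-- def create_spiral_text(text: str, clockwise: bool = True) -> str: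
--     """Create spiraling text effect."""
--     words = text.split()
--     if len(words) < 3:
--         return text
--     return "\n".join(
--         " " * (6 - abs(i - 6)) + word
--         for i, word in enumerate(words[:10])
--     )
-- ===== Notes on version B (the rewrite author's own statement) =====
-- stated objective: simpler
-- what changed: Replaces the stateful indent/direction accumulator and its direction-flip branch with a stateless closed-form triangle-wave indent 6-abs(i-6) per word index, joined in one comprehension (clockwise provably has no effect on the output).
import Mathlib
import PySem

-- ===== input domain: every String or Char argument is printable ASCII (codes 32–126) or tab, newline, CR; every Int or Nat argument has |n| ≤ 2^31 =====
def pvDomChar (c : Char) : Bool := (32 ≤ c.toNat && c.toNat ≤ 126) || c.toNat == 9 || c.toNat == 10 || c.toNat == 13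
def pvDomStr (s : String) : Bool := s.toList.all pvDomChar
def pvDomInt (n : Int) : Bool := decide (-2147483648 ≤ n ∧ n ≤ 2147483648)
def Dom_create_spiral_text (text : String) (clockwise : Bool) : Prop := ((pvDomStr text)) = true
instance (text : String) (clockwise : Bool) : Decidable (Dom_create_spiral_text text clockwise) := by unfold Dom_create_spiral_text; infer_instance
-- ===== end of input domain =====

-- B replaces A's stateful indent/direction accumulator with a stateless closed-form
-- triangle-wave indent per word index (simpler; same return value everywhere).

-- ===== PORT A =====
-- the for-loop over enumerate(words[:10]): i is unused by the body, so the loop state is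
-- (accumulated lines, indent, direction), carried by structural recursion over the words.
def pvSpiralLoopA : List String → List String → Int → Int → List String
  | [], spiral, _, _ => spiral
  | w :: ws, spiral, indent, direction =>
      let spiral' := spiral ++ [String.mk (List.replicate indent.natAbs ' ' ++ w.toList)]
      let indent' := indent + direction
      let direction' := if indent'.natAbs > 5 then -direction else direction
      pvSpiralLoopA ws spiral' indent' direction'

def create_spiral_text (text : String) (clockwise : Bool) : String :=
  let words := PySem.Str.split₀ text
  if words.length < 3 then text
  else
    PySem.Str.join "\n"
      (pvSpiralLoopA (PySem.List.slice words none (some (10:Int))) [] 0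
        (if clockwise then 1 else -1))

-- ===== PORT B =====
-- " " * (6 - abs(i - 6)) + word; Python's repeat of a negative count is "" just as Nat
-- subtraction clamps at 0 (never reached for i ≤ 9).
def pvSpiralLineB (p : Int × String) : String :=
  String.mk (List.replicate (6 - (p.1 - 6).natAbs) ' ' ++ p.2.toList)

def create_spiral_text_alt (text : String) (clockwise : Bool) : String :=
  let words := PySem.Str.split₀ text
  if words.length < 3 then text
  else
    PySem.Str.join "\n"
      ((PySem.List.enumerate (PySem.List.slice words none (some (10:Int)))).map pvSpiralLineB)

-- ===== PRECONDITION & SPEC =====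
def Spec_create_spiral_text (text : String) (clockwise : Bool) (out : String) : Prop := out = create_spiral_text_alt text clockwise
instance (text : String) (clockwise : Bool) (out : String) : Decidable (Spec_create_spiral_text text clockwise out) := by unfold Spec_create_spiral_text; infer_instance

-- ===== CLAIM (what is proved, stated in full; the proofs are below) =====
def Claim_equal_create_spiral_text : Prop := ∀ (text : String) (clockwise : Bool), Dom_create_spiral_text text clockwise → Spec_create_spiral_text text clockwise (create_spiral_text text clockwise)

-- ===== LEMMAS AND PROOFS =====

-- the loop invariant: after j words, indent = d * pvF j and direction = d * pvG j
def pvF (j : Nat) : Int := if j ≤ 6 then (j : Int) else 12 - (j : Int)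
def pvG (j : Nat) : Int := if j ≤ 5 then 1 else -1

theorem pvSpiralLoopA_eq_map (ws : List String) :
    ∀ (j : Nat) (acc : List String) (d : Int), j + ws.length ≤ 10 → (d = 1 ∨ d = -1) →
    pvSpiralLoopA ws acc (d * pvF j) (d * pvG j) =
      acc ++ (PySem.List.enumerate ws (j : Int)).map pvSpiralLineB := by
  induction ws with
  | nil => intro j acc d _ _; simp [pvSpiralLoopA, PySem.List.enumerate_nil]
  | cons w ws ih =>
    intro j acc d hj hd
    have hj9 : j ≤ 9 := by simp [List.length_cons] at hj; omega
    have habs : (d * pvF j).natAbs = 6 - ((j : Int) - 6).natAbs := by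
      rcases hd with rfl | rfl <;> simp [pvF] <;> split_ifs <;> omega
    have hstep : d * pvF j + d * pvG j = d * pvF (j + 1) := by
      rcases hd with rfl | rfl <;> simp [pvF, pvG] <;> split_ifs <;> omega
    have hdir : (if (d * pvF (j + 1)).natAbs > 5 then -(d * pvG j) else d * pvG j)
        = d * pvG (j + 1) := by
      rcases hd with rfl | rfl <;> simp [pvF, pvG] <;> split_ifs <;> omega
    rw [pvSpiralLoopA, PySem.List.enumerate_cons]
    simp only [habs, hstep, hdir]
    rw [ih (j + 1) _ d (by simp at hj ⊢; omega) hd]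
    simp [pvSpiralLineB]

-- ===== VERDICT (by name: the statement is the Claim_ definition above) =====
theorem create_spiral_text_spec : Claim_equal_create_spiral_text := by
  intro text clockwise _
  unfold Spec_create_spiral_text create_spiral_text create_spiral_text_alt
  by_cases h : (PySem.Str.split₀ text).length < 3
  · simp [h]
  · simp only [h, if_false]
    congr 1
    have h10 : PySem.List.slice (PySem.Str.split₀ text) none (some (10:Int))
        = (PySem.Str.split₀ text).take 10 := by
      simpa using PySem.List.slice_to_natCast (PySem.Str.split₀ text) 10
    rw [h10]
    have := pvSpiralLoopA_eq_map ((PySem.Str.split₀ text).take 10) 0 []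
      (if clockwise then 1 else -1) (by simp)
      (by cases clockwise <;> simp)
    simpa [pvF, pvG] using this
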